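-- pv_equiv track=rewrite | github.com/c04nh/CosPro-2 | 6-07.py | solution
-- ===== SOURCE A (Python) =====
-- def solution(money, chairs, desks):
-- 	answer = 0
-- 	for chair in chairs:
-- 		for desk in desks:
-- 			price = chair + desk
-- 			if answer < price and money >= price:
-- 				answer = price
-- 	return answer
-- ===== SOURCE B (Python) =====
-- def solution(money, chairs, desks):
--     ds = sorted(desks)
--     best = 0
--     for chair in chairs:
--         limit = money - chair
--         lo, hi = 0, len(ds)
--         while lo < hi:
--             mid = (lo + hi) // 2
--             if ds[mid] <= limit:
--                 lo = mid + 1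
--             else:
--                 hi = mid
--         if lo > 0:
--             price = chair + ds[lo - 1]
--             if price > best:
--                 best = price
--     return best
-- ===== Notes on version B (the rewrite author's own statement) =====
-- stated objective: faster
-- what changed: Replaces the nested chair x desk scan with a pre-sort of the desks plus, per chair, a binary search for the largest affordable desk.
import Mathlib
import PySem

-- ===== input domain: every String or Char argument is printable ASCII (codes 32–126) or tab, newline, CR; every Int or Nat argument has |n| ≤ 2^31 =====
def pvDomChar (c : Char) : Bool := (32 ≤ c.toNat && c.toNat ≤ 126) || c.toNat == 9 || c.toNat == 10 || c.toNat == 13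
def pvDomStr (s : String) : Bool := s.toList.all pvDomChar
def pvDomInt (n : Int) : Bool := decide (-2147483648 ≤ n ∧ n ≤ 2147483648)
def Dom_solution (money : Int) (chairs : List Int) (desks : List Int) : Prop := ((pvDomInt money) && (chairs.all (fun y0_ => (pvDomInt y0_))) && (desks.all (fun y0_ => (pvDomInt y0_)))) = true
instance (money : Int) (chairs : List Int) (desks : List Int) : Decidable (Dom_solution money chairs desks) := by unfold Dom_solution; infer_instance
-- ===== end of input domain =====

-- B replaces A's nested chair×desk scan by sorting the desks once and binary-searching,
-- per chair, the largest affordable desk (objective: faster).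


-- ===== PORT A =====
def solution (money : Int) (chairs : List Int) (desks : List Int) : Int :=
  chairs.foldl (fun answer chair =>
    desks.foldl (fun answer desk =>
      if answer < chair + desk ∧ money ≥ chair + desk then chair + desk else answer) answer) 0

-- ===== PORT B =====
-- hand-written binary search from Source B (mid = (lo+hi)//2 written inline):
-- result = insertion point of `limit` in the sorted ds[lo:hi]
-- fuel = hi - lo, the loop's own measure (structural recursion so the kernel can evaluate it)
def pvBsearchF (ds : List Int) (limit : Int) : Nat → Nat → Nat → Nat
  | 0, lo, _ => lo
  | fuel + 1, lo, hi =>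
    if lo < hi then
      if ds.getD ((lo + hi) / 2) 0 ≤ limit then pvBsearchF ds limit fuel ((lo + hi) / 2 + 1) hi
      else pvBsearchF ds limit fuel lo ((lo + hi) / 2)
    else lo

def pvBsearch (ds : List Int) (limit : Int) (lo hi : Nat) : Nat :=
  pvBsearchF ds limit (hi - lo) lo hi

def solution_alt (money : Int) (chairs : List Int) (desks : List Int) : Int :=
  let ds := PySem.List.sorted desks (fun x => x) false
  chairs.foldl (fun best chair =>
    if pvBsearch ds (money - chair) 0 ds.length > 0 then
      (if chair + ds.getD (pvBsearch ds (money - chair) 0 ds.length - 1) 0 > best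
       then chair + ds.getD (pvBsearch ds (money - chair) 0 ds.length - 1) 0 else best)
    else best) 0

-- ===== PRECONDITION & SPEC =====
def Spec_solution (money : Int) (chairs : List Int) (desks : List Int) (out : Int) : Prop := out = solution_alt money chairs desks
instance (money : Int) (chairs : List Int) (desks : List Int) (out : Int) : Decidable (Spec_solution money chairs desks out) := by unfold Spec_solution; infer_instance

-- ===== CLAIM (what is proved, stated in full; the proofs are below) =====
def Claim_equal_solution : Prop := ∀ (money : Int) (chairs : List Int) (desks : List Int), Dom_solution money chairs desks → Spec_solution money chairs desks (solution money chairs desks)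

-- ===== LEMMAS AND PROOFS =====

-- characterisation of "the best answer ≥ a obtainable with a desk from S priced within limit"
def pvBestP (c limit a : Int) (S : Int → Prop) (r : Int) : Prop :=
  a ≤ r ∧ (r = a ∨ ∃ d, S d ∧ d ≤ limit ∧ r = c + d) ∧ (∀ d, S d → d ≤ limit → c + d ≤ r)

theorem pvBestP_unique {c limit a : Int} {S : Int → Prop} {r₁ r₂ : Int}
    (h₁ : pvBestP c limit a S r₁) (h₂ : pvBestP c limit a S r₂) : r₁ = r₂ := by
  obtain ⟨ha₁, he₁, hb₁⟩ := h₁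
  obtain ⟨ha₂, he₂, hb₂⟩ := h₂
  rcases he₁ with rfl | ⟨d₁, hS₁, hl₁, rfl⟩ <;> rcases he₂ with rfl | ⟨d₂, hS₂, hl₂, rfl⟩
  · rfl
  · have := hb₁ d₂ hS₂ hl₂; omega
  · have := hb₂ d₁ hS₁ hl₁; omega
  · have := hb₁ d₂ hS₂ hl₂; have := hb₂ d₁ hS₁ hl₁; omega

-- A's inner loop satisfies the characterisation
theorem pvBestP_foldA (money c : Int) :
    ∀ (l : List Int) (a : Int),
      pvBestP c (money - c) a (fun d => d ∈ l)
        (l.foldl (fun answer desk =>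
          if answer < c + desk ∧ money ≥ c + desk then c + desk else answer) a) := by
  intro l
  induction l with
  | nil => intro a; exact ⟨le_refl _, Or.inl rfl, by simp⟩
  | cons x xs ih =>
    intro a
    simp only [List.foldl_cons]
    by_cases hc : a < c + x ∧ money ≥ c + x
    · rw [if_pos hc]
      obtain ⟨ha, he, hb⟩ := ih (c + x)
      refine ⟨by omega, ?_, ?_⟩
      · rcases he with heq | ⟨d, hS, hl, hr⟩
        · exact Or.inr ⟨x, by simp, by omega, heq⟩
        · exact Or.inr ⟨d, by simp [hS], hl, hr⟩
      · intro d hd hdl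
        rcases List.mem_cons.mp hd with rfl | hmem
        · omega
        · exact hb d hmem hdl
    · rw [if_neg hc]
      obtain ⟨ha, he, hb⟩ := ih a
      refine ⟨ha, ?_, ?_⟩
      · rcases he with heq | ⟨d, hS, hl, hr⟩
        · exact Or.inl heq
        · exact Or.inr ⟨d, by simp [hS], hl, hr⟩
      · intro d hd hdl
        rcases List.mem_cons.mp hd with rfl | hmem
        · omega
        · exact hb d hmem hdl

-- invariant of the hand-written binary search, by induction on the fuel
theorem pvBsearchF_inv (ds : List Int) (limit : Int)
    (hs : ds.Pairwise (· ≤ ·)) :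
    ∀ (n lo hi : Nat), hi - lo ≤ n → lo ≤ hi → hi ≤ ds.length →
      (∀ j (_ : j < ds.length), j < lo → ds[j] ≤ limit) →
      (∀ j (_ : j < ds.length), hi ≤ j → limit < ds[j]) →
      lo ≤ pvBsearchF ds limit n lo hi ∧ pvBsearchF ds limit n lo hi ≤ hi ∧
      (∀ j (_ : j < ds.length), j < pvBsearchF ds limit n lo hi → ds[j] ≤ limit) ∧
      (∀ j (_ : j < ds.length), pvBsearchF ds limit n lo hi ≤ j → limit < ds[j]) := by
  have hmono : ∀ (i j : Nat) (_ : i < ds.length) (_ : j < ds.length), i ≤ j → ds[i] ≤ ds[j] := by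
    intro i j hi hj hij
    rcases Nat.lt_or_ge i j with h | h
    · exact List.pairwise_iff_getElem.mp hs i j hi hj h
    · have : i = j := by omega
      subst this; rfl
  intro n
  induction n with
  | zero =>
    intro lo hi hn hlh hhi hL hH
    rw [pvBsearchF]
    exact ⟨le_refl _, hlh, fun j hj hjlt => hL j hj hjlt, fun j hj hjge => hH j hj (by omega)⟩
  | succ n ih =>
    intro lo hi hn hlh hhi hL hH
    by_cases h : lo < hi
    · have hmlt : (lo + hi) / 2 < ds.length := by omega
      rw [pvBsearchF, if_pos h, List.getD_eq_getElem ds 0 hmlt]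
      by_cases hle : ds[(lo + hi) / 2] ≤ limit
      · rw [if_pos hle]
        have := ih ((lo + hi) / 2 + 1) hi (by omega) (by omega) hhi
          (fun j hj hjlt => le_trans (hmono j ((lo + hi) / 2) hj hmlt (by omega)) hle) hH
        exact ⟨by omega, this.2.1, this.2.2.1, this.2.2.2⟩
      · rw [if_neg hle]
        have hm : limit < ds[(lo + hi) / 2] := by omega
        have := ih lo ((lo + hi) / 2) (by omega) (by omega) (by omega) hL
          (fun j hj hjge => lt_of_lt_of_le hm (hmono ((lo + hi) / 2) j hmlt hj hjge))
        exact ⟨this.1, by omega, this.2.2.1, this.2.2.2⟩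
    · rw [pvBsearchF, if_neg h]
      exact ⟨le_refl _, hlh, fun j hj hjlt => hL j hj hjlt, fun j hj hjge => hH j hj (by omega)⟩

-- B's per-chair step satisfies the characterisation (on the sorted list)
theorem pvBestP_stepB (money c : Int) (ds : List Int) (hs : ds.Pairwise (· ≤ ·)) (a : Int) :
    pvBestP c (money - c) a (fun d => d ∈ ds)
      (if pvBsearch ds (money - c) 0 ds.length > 0 then
        (if c + ds.getD (pvBsearch ds (money - c) 0 ds.length - 1) 0 > a
         then c + ds.getD (pvBsearch ds (money - c) 0 ds.length - 1) 0 else a)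
       else a) := by
  obtain ⟨-, hle, hlt, hgt⟩ := pvBsearchF_inv ds (money - c) hs (ds.length - 0) 0 ds.length
    (by omega) (by omega) (le_refl _) (by omega) (by intro j hj hge; omega)
  rw [show pvBsearch ds (money - c) 0 ds.length = pvBsearchF ds (money - c) (ds.length - 0) 0 ds.length from rfl]
  set r := pvBsearchF ds (money - c) (ds.length - 0) 0 ds.length with hr
  by_cases h0 : r > 0
  · have hr1 : r - 1 < ds.length := by omega
    rw [if_pos h0, List.getD_eq_getElem ds 0 hr1]
    have hm : ds[r - 1] ≤ money - c := hlt (r - 1) hr1 (by omega)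
    have hmem : ds[r - 1] ∈ ds := List.getElem_mem hr1
    refine ⟨by split <;> omega, ?_, ?_⟩
    · by_cases hgtc : c + ds[r - 1] > a
      · rw [if_pos hgtc]
        exact Or.inr ⟨ds[r - 1], hmem, hm, rfl⟩
      · rw [if_neg hgtc]
        exact Or.inl rfl
    · intro d hd hdl
      obtain ⟨j, hj, rfl⟩ := List.mem_iff_getElem.mp hd
      rcases Nat.lt_or_ge j r with hjr | hjr
      · have hjle : ds[j] ≤ ds[r - 1] := by
          rcases Nat.lt_or_ge j (r - 1) with h' | h'
          · exact List.pairwise_iff_getElem.mp hs j (r - 1) hj hr1 h'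
          · have : j = r - 1 := by omega
            subst this; rfl
        split <;> omega
      · exact absurd (hgt j hj (by omega)) (by omega)
  · rw [if_neg h0]
    refine ⟨le_refl _, Or.inl rfl, ?_⟩
    intro d hd hdl
    obtain ⟨j, hj, rfl⟩ := List.mem_iff_getElem.mp hd
    exact absurd (hgt j hj (by omega)) (by omega)

-- ===== VERDICT (by name: the statement is the Claim_ definition above) =====
theorem solution_spec : Claim_equal_solution := by
  intro money chairs desks _
  unfold Spec_solution solution solution_alt
  have hsorted : (PySem.List.sorted desks (fun x => x) false).Pairwise (· ≤ ·) :=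
    PySem.List.sorted_pairwise desks (fun x => x)
  have hperm : (PySem.List.sorted desks (fun x => x) false).Perm desks :=
    PySem.List.sorted_perm desks (fun x => x) false
  refine List.foldl_ext _ _ 0 ?_
  intro a c _
  have hA := pvBestP_foldA money c desks a
  have hB := pvBestP_stepB money c (PySem.List.sorted desks (fun x => x) false) hsorted a
  refine pvBestP_unique hA ⟨hB.1, ?_, fun d hd => hB.2.2 d (hperm.mem_iff.mpr hd)⟩
  rcases hB.2.1 with h | ⟨d, hS, hl, hr⟩
  · exact Or.inl h
  · exact Or.inr ⟨d, hperm.mem_iff.mp hS, hl, hr⟩
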